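-- pv_equiv track=rewrite | github.com/andr3wmac/IronMogFF7 | tools/gamedata/ff7/utils.py | getUintFromBits
-- ===== SOURCE A (Python) =====
-- def getUintFromBits(data, n_bits, bit_offset):
--     value = 0
--     for i in range(n_bits):
--         byte_index = (bit_offset + i) // 8
--         bit_index = 7 - ((bit_offset + i) % 8)  # <-- MSB first!
--         bit = (data[byte_index] >> bit_index) & 1
--         value = (value << 1) | bit
--     return value
-- ===== SOURCE B (Python) =====
-- def getUintFromBits(data, n_bits, bit_offset):
--     if n_bits <= 0:
--         return 0
--     first = bit_offset // 8
--     last = (bit_offset + n_bits - 1) // 8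
--     span = 0
--     for idx in range(first, last + 1):
--         span = (span << 8) | (data[idx] & 0xFF)
--     shift = (last + 1) * 8 - (bit_offset + n_bits)
--     return (span >> shift) & ((1 << n_bits) - 1)
-- ===== Notes on version B (the rewrite author's own statement) =====
-- stated objective: faster
-- what changed: B replaces A's per-bit loop (one division/mask per bit) by a whole-byte pass: it assembles the covering bytes first..last into one integer, then shifts off the trailing bits and masks to n_bits.
import Mathlib
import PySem

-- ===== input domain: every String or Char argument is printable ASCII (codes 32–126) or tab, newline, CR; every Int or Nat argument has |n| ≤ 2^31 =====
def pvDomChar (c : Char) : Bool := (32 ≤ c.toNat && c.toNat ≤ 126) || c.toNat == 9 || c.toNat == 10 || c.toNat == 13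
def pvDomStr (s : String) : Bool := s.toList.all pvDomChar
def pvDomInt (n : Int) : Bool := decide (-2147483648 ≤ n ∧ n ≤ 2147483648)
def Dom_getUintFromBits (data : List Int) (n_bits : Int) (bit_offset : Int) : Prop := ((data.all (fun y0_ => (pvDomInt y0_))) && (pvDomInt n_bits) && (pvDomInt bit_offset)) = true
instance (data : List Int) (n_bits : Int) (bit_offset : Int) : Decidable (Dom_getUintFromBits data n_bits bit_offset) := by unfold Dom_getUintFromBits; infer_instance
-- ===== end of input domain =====

-- B assembles the value whole-byte-at-a-time (span of covering bytes, then shift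
-- and mask) instead of A's per-bit loop; objective: faster by a constant factor.


-- ===== PORT A =====
-- `data[byte_index]` is ported with pyGetD (Pre_ excludes exactly the IndexError inputs);
-- `x >> k` is `x >>> k.toNat` (exact: bit_index ∈ [0,7] since Python's % 8 is nonneg here),
-- `& 1` / `<< 1` / `|` are PySem.Int.band / <<< (1:Nat) / PySem.Int.bor.
def getUintFromBits (data : List Int) (n_bits : Int) (bit_offset : Int) : Int :=
  (PySem.List.pyRange 0 n_bits 1).foldl
    (fun value i =>
      let byte_index := PySem.Int.floordiv (bit_offset + i) 8
      let bit_index := 7 - PySem.Int.mod (bit_offset + i) 8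
      let bit := PySem.Int.band (PySem.List.pyGetD data byte_index 0 >>> bit_index.toNat) 1
      PySem.Int.bor (value <<< (1:Nat)) bit)
    0

-- ===== PORT B =====
-- `span >> shift` is `span >>> shift.toNat` (exact: shift ≥ 0 because (last+1)*8 ≥ bit_offset+n_bits);
-- `& 0xFF` is band · 255, `(1 << n_bits) - 1` is (1 <<< n_bits.toNat) - 1 (exact: n_bits > 0 here).
def getUintFromBits_alt (data : List Int) (n_bits : Int) (bit_offset : Int) : Int :=
  if n_bits ≤ 0 then 0
  else
    let first := PySem.Int.floordiv bit_offset 8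
    let last := PySem.Int.floordiv (bit_offset + n_bits - 1) 8
    let span := (PySem.List.pyRange first (last + 1) 1).foldl
      (fun span idx => PySem.Int.bor (span <<< (8:Nat)) (PySem.Int.band (PySem.List.pyGetD data idx 0) 255)) 0
    let shift := (last + 1) * 8 - (bit_offset + n_bits)
    PySem.Int.band (span >>> shift.toNat) ((1 <<< n_bits.toNat) - 1)

-- ===== PRECONDITION & SPEC =====
-- Pre_ excludes exactly the inputs where Python A raises IndexError: some accessed byte
-- index (they are first..last, first = bit_offset//8, last = (bit_offset+n_bits-1)//8)
-- falls outside the valid Python index range [-len(data), len(data)).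
def Pre_getUintFromBits (data : List Int) (n_bits : Int) (bit_offset : Int) : Prop :=
  n_bits ≤ 0 ∨
    (-(data.length : Int) ≤ PySem.Int.floordiv bit_offset 8 ∧
      PySem.Int.floordiv (bit_offset + n_bits - 1) 8 < (data.length : Int))
instance (data : List Int) (n_bits : Int) (bit_offset : Int) : Decidable (Pre_getUintFromBits data n_bits bit_offset) := by unfold Pre_getUintFromBits; infer_instance

def pvWitness_getUintFromBits : List Int × Int × Int := ([171, 205], 12, 2)

def Spec_getUintFromBits (data : List Int) (n_bits : Int) (bit_offset : Int) (out : Int) : Prop := out = getUintFromBits_alt data n_bits bit_offset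
instance (data : List Int) (n_bits : Int) (bit_offset : Int) (out : Int) : Decidable (Spec_getUintFromBits data n_bits bit_offset out) := by unfold Spec_getUintFromBits; infer_instance

-- ===== CLAIM (what is proved, stated in full; the proofs are below) =====
def Claim_equal_getUintFromBits : Prop := ∀ (data : List Int) (n_bits : Int) (bit_offset : Int), Dom_getUintFromBits data n_bits bit_offset → Pre_getUintFromBits data n_bits bit_offset → Spec_getUintFromBits data n_bits bit_offset (getUintFromBits data n_bits bit_offset)

-- ===== LEMMAS AND PROOFS =====

-- the bit A extracts at absolute bit position j (ediv/emod form; both divisors positive)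
def pvBit (data : List Int) (j : Int) : Int :=
  (PySem.List.pyGetD data (j / 8) 0 / 2 ^ ((7 - j % 8).toNat)) % 2

-- B's span fold over byte indices a..b-1 (exactly B's fold function)
def pvSpan (data : List Int) (a b : Int) : Int :=
  (PySem.List.pyRange a b 1).foldl
    (fun span idx => PySem.Int.bor (span <<< (8:Nat)) (PySem.Int.band (PySem.List.pyGetD data idx 0) 255)) 0

theorem pv_band255 (g : Int) : PySem.Int.band g 255 = g % 256 := by
  unfold PySem.Int.band
  have h255 : ∀ n : Nat, n &&& 255 = n % 256 := fun n => by
    have := Nat.and_two_pow_sub_one_eq_mod n 8; norm_num at this; exact this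
  by_cases hg : 0 ≤ g
  · simp only [hg, if_true, if_pos (by norm_num : (0:Int) ≤ 255)]
    rw [show ((255:Int).toNat) = 255 from rfl, h255]; omega
  · simp only [hg, if_false, if_pos (by norm_num : (0:Int) ≤ 255)]
    rw [show ((255:Int).toNat) = 255 from rfl, Nat.and_comm, h255]; omega

-- a left-shifted value ORed with a small value is plain addition (disjoint bits)
theorem pv_lor_mul_pow (m b k : Nat) (h : b < 2 ^ k) : (m * 2 ^ k) ||| b = m * 2 ^ k + b := by
  apply Nat.eq_of_testBit_eq
  intro j
  rw [Nat.testBit_lor, Nat.testBit_mul_two_pow, mul_comm m, Nat.testBit_two_pow_mul_add m h j]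
  by_cases hj : j < k
  · simp [hj, Nat.not_le.mpr hj]
  · have hb : b.testBit j = false :=
      Nat.testBit_lt_two_pow (lt_of_lt_of_le h (Nat.pow_le_pow_right (by norm_num) (by omega)))
    simp [hj, Nat.le_of_not_lt hj, hb]

theorem pv_bor_shl (a b : Int) (k : Nat) (ha : 0 ≤ a) (hb : 0 ≤ b) (h : b < 2 ^ k) :
    PySem.Int.bor (a <<< k) b = a * 2 ^ k + b := by
  have hcast : ((2 ^ k : Nat) : Int) = 2 ^ k := by push_cast; ring
  have h1 : (0:Int) ≤ a * 2 ^ k := by positivity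
  rw [Int.shiftLeft_eq a k, PySem.Int.bor_of_nonneg h1 hb]
  have ht : (a * 2 ^ k).toNat = a.toNat * 2 ^ k := by
    rw [show a * 2 ^ k = a * ((2 ^ k : Nat) : Int) by rw [hcast],
      Int.toNat_mul ha (by positivity), Int.toNat_natCast]
  have hbk : b.toNat < 2 ^ k := by omega
  rw [ht, pv_lor_mul_pow _ _ _ hbk]
  push_cast [Int.toNat_of_nonneg ha, Int.toNat_of_nonneg hb]
  ring

theorem pv_band_mask (a : Int) (m : Nat) (ha : 0 ≤ a) :
    PySem.Int.band a (2 ^ m - 1) = a % 2 ^ m := by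
  have hp : (0:Int) < 2 ^ m := by positivity
  rw [PySem.Int.band_of_nonneg ha (by omega)]
  have ht : ((2:Int) ^ m - 1).toNat = 2 ^ m - 1 := by
    have : ((2 ^ m : Nat) : Int) = 2 ^ m := by push_cast; ring
    omega
  rw [ht, Nat.and_two_pow_sub_one_eq_mod]
  push_cast [Int.toNat_of_nonneg ha]
  rfl

-- appending one bit below n kept bits
theorem pv_two_mul_emod (Q r : Int) (n : Nat) (hr0 : 0 ≤ r) (hr2 : r < 2) :
    (2 * Q + r) % 2 ^ (n + 1) = 2 * (Q % 2 ^ n) + r := by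
  have hp : (0:Int) < 2 ^ n := by positivity
  have hQ := Int.mul_ediv_add_emod Q (2 ^ n)
  have hm0 : 0 ≤ Q % 2 ^ n := Int.emod_nonneg Q (by omega)
  have hm1 : Q % 2 ^ n < 2 ^ n := Int.emod_lt_of_pos Q hp
  have he : 2 * Q + r = (2 * (Q % 2 ^ n) + r) + 2 ^ (n + 1) * (Q / 2 ^ n) := by
    ring_nf; ring_nf at hQ ⊢; nlinarith [hQ]
  rw [he, Int.add_mul_emod_self_left, Int.emod_eq_of_lt (by omega) (by ring_nf; nlinarith)]

-- bit k (k ≤ 7) of the low byte of g is bit k of g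
theorem pv_bitlow (g : Int) (k : Nat) (hk : k ≤ 7) :
    (g % 256 / 2 ^ k) % 2 = (g / 2 ^ k) % 2 := by
  have hg := Int.mul_ediv_add_emod g 256
  have hsplit : (2:Int) ^ 8 = 2 ^ (8 - k) * 2 ^ k := by
    rw [← pow_add]; congr 1; omega
  have h8 : (256:Int) = 2 ^ 8 := by norm_num
  have hrepr : g = g % 256 + (g / 256 * 2 ^ (8 - k)) * 2 ^ k := by
    rw [mul_assoc, ← hsplit, ← h8]; omega
  rw [show g / 2 ^ k = (g % 256 + (g / 256 * 2 ^ (8 - k)) * 2 ^ k) / 2 ^ k from by rw [← hrepr],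
    Int.add_mul_ediv_right _ _ (by positivity : (0:Int) < 2 ^ k).ne']
  have hstep : g / 256 * 2 ^ (8 - k) = (g / 256 * 2 ^ (8 - k - 1)) * 2 := by
    rw [mul_assoc]; congr 1; rw [← pow_succ]; congr 1; omega
  rw [hstep, Int.add_mul_emod_self_right]

theorem pv_step (data : List Int) (s idx : Int) (hs : 0 ≤ s) :
    PySem.Int.bor (s <<< (8:Nat)) (PySem.Int.band (PySem.List.pyGetD data idx 0) 255)
      = 256 * s + PySem.List.pyGetD data idx 0 % 256 := by
  rw [pv_band255]
  have h := pv_bor_shl s (PySem.List.pyGetD data idx 0 % 256) 8 hs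
    (Int.emod_nonneg _ (by norm_num))
    (by have := Int.emod_lt_of_pos (PySem.List.pyGetD data idx 0) (show (0:Int) < 256 by norm_num)
        norm_num; omega)
  norm_num at h
  rw [mul_comm (256:Int) s]
  exact h

theorem pv_span_nonneg (data : List Int) (a b : Int) : 0 ≤ pvSpan data a b := by
  unfold pvSpan
  generalize PySem.List.pyRange a b 1 = l
  suffices h : ∀ (l : List Int) (s : Int), 0 ≤ s → 0 ≤ l.foldl
      (fun span idx => PySem.Int.bor (span <<< (8:Nat)) (PySem.Int.band (PySem.List.pyGetD data idx 0) 255)) s from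
    h l 0 le_rfl
  intro l
  induction l with
  | nil => intro s hs; simpa using hs
  | cons x xs ih =>
    intro s hs
    simp only [List.foldl_cons]
    apply ih
    rw [pv_step data s x hs]
    have := Int.emod_nonneg (PySem.List.pyGetD data x 0) (show (256:Int) ≠ 0 by norm_num)
    omega

theorem pv_span_succ (data : List Int) (a b : Int) (h : a ≤ b) :
    pvSpan data a (b + 1) = 256 * pvSpan data a b + PySem.List.pyGetD data b 0 % 256 := by
  unfold pvSpan
  rw [PySem.List.pyRange_one_succ_right h, List.foldl_append]
  simp only [List.foldl_cons, List.foldl_nil]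
  exact pv_step data _ b (pv_span_nonneg data a b)

theorem pv_bit_bounds (data : List Int) (j : Int) : 0 ≤ pvBit data j ∧ pvBit data j < 2 :=
  ⟨Int.emod_nonneg _ (by norm_num), Int.emod_lt_of_pos _ (by norm_num)⟩

-- A adds one bit per iteration (MSB first)
theorem pv_A_succ (data : List Int) (off : Int) (n : Nat)
    (hv : 0 ≤ getUintFromBits data (n : Int) off) :
    getUintFromBits data ((n : Int) + 1) off
      = 2 * getUintFromBits data (n : Int) off + pvBit data (off + n) := by
  unfold getUintFromBits at hv ⊢
  rw [PySem.List.pyRange_one_succ_right (by positivity : (0:Int) ≤ (n:Int)), List.foldl_append]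
  simp only [List.foldl_cons, List.foldl_nil]
  rw [PySem.Int.floordiv_eq_ediv_of_pos (by norm_num), PySem.Int.mod_eq_emod_of_pos (by norm_num),
    PySem.Int.band_one, PySem.Int.mod_eq_emod_of_pos (by norm_num),
    Int.shiftRight_eq_div_pow]
  have hb := pv_bit_bounds data (off + n)
  unfold pvBit at hb ⊢
  push_cast
  rw [pv_bor_shl _ _ 1 hv hb.1 (by simpa using hb.2)]
  ring

-- the heart: A's per-bit fold equals span-shift-mask, for every bit count n
theorem pv_main (data : List Int) (off : Int) (n : Nat) :
    getUintFromBits data (n : Int) off =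
      pvSpan data (off / 8) ((off + n - 1) / 8 + 1) /
          2 ^ (((off + n - 1) / 8 + 1) * 8 - (off + n)).toNat % 2 ^ n := by
  induction n with
  | zero =>
      have h0 : PySem.List.pyRange 0 (0:Int) 1 = [] := PySem.List.pyRange_one_eq_nil le_rfl
      simp [getUintFromBits, h0]
  | succ n ih =>
      have hvnn : 0 ≤ getUintFromBits data (n : Int) off := by
        rw [ih]; exact Int.emod_nonneg _ (by positivity)
      have hA : getUintFromBits data ((n:Int) + 1) off
          = 2 * getUintFromBits data (n : Int) off + pvBit data (off + n) :=
        pv_A_succ data off n hvnn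
      have hcast : ((n:Int) + 1) = ((n + 1 : Nat) : Int) := by push_cast; ring
      rw [← hcast, hA, ih]
      have hbb := pv_bit_bounds data (off + (n:Int))
      by_cases hc : (off + (n:Int)) % 8 = 0
      · -- byte boundary: a new byte enters the span, old shift was 0, new shift is 7
        have key1 : (off + (((n:Nat):Int) + 1) - 1) / 8 = (off + (n:Nat) - 1) / 8 + 1 := by omega
        have key2 : (((off + (n:Nat) - 1) / 8 + 1 + 1) * 8 - (off + (((n:Nat):Int) + 1))).toNat = 7 := by omega
        have key3 : (((off + (n:Nat) - 1) / 8 + 1) * 8 - (off + (n:Nat))).toNat = 0 := by omega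
        set L := (off + (n:Nat) - 1) / 8 with hL
        have hfl : off / 8 ≤ L + 1 := by omega
        have hspan := pv_span_succ data (off/8) (L+1) hfl
        have hXnn := pv_span_nonneg data (off/8) (L+1)
        set X := pvSpan data (off/8) (L+1) with hX
        set g := PySem.List.pyGetD data (L+1) 0 with hg
        have hbmod : 0 ≤ g % 256 ∧ g % 256 < 256 :=
          ⟨Int.emod_nonneg _ (by norm_num), Int.emod_lt_of_pos _ (by norm_num)⟩
        have hdiv : (256 * X + g % 256) / 2 ^ 7 = g % 256 / 2 ^ 7 + 2 * X := by
          rw [show 256 * X + g % 256 = g % 256 + (2 * X) * 2 ^ 7 by ring]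
          exact Int.add_mul_ediv_right _ _ (by norm_num)
        have hbit : g % 256 / 2 ^ 7 = pvBit data (off + n) := by
          unfold pvBit
          have h1 : (off + (n:Nat)) / 8 = L + 1 := by omega
          have h2 : ((7 : Int) - (off + (n:Nat)) % 8).toNat = 7 := by omega
          rw [h1, h2, ← hg]
          have h3 : g % 256 / 2 ^ 7 < 2 := by omega
          have h4 : 0 ≤ g % 256 / 2 ^ 7 := Int.ediv_nonneg hbmod.1 (by norm_num)
          rw [← pv_bitlow g 7 (by norm_num), Int.emod_eq_of_lt h4 h3]
        push_cast
        rw [key1, key2, key3, hspan, hdiv,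
          show g % 256 / 2 ^ 7 + 2 * X = 2 * X + pvBit data (off + (n:Nat)) by rw [hbit]; ring,
          pv_two_mul_emod X _ n hbb.1 hbb.2]
        norm_num
      · -- inside a byte: span unchanged, shift drops by one
        have key1 : (off + (((n:Nat):Int) + 1) - 1) / 8 = (off + (n:Nat) - 1) / 8 := by omega
        set L := (off + (n:Nat) - 1) / 8 with hL
        set k := ((7 : Int) - (off + (n:Nat)) % 8).toNat with hk
        have hk7 : k ≤ 6 := by omega
        have key2 : ((L + 1) * 8 - (off + (((n:Nat):Int) + 1))).toNat = k := by omega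
        have key3 : ((L + 1) * 8 - (off + (n:Nat))).toNat = k + 1 := by omega
        have hfl : off / 8 ≤ L := by omega
        have hspan := pv_span_succ data (off/8) L hfl
        have hPnn := pv_span_nonneg data (off/8) L
        set P := pvSpan data (off/8) L with hP
        set g := PySem.List.pyGetD data L 0 with hg
        have hbmod : 0 ≤ g % 256 ∧ g % 256 < 256 :=
          ⟨Int.emod_nonneg _ (by norm_num), Int.emod_lt_of_pos _ (by norm_num)⟩
        have hXnn := pv_span_nonneg data (off/8) (L+1)
        have hXeq : pvSpan data (off/8) (L+1) = 256 * P + g % 256 := hspan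
        set X := pvSpan data (off/8) (L+1) with hX
        have hsplit : (2:Int) ^ 8 = 2 ^ (8 - k) * 2 ^ k := by
          rw [← pow_add]; congr 1; omega
        have hdivk : X / 2 ^ k = g % 256 / 2 ^ k + P * 2 ^ (8 - k) := by
          rw [hXeq, show 256 * P + g % 256 = g % 256 + (P * 2 ^ (8 - k)) * 2 ^ k by
            rw [mul_assoc, ← hsplit]; norm_num; ring]
          exact Int.add_mul_ediv_right _ _ (pow_pos (by norm_num : (0:Int) < 2) k).ne'
        have hmod2 : X / 2 ^ k % 2 = pvBit data (off + n) := by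
          unfold pvBit
          have h1 : (off + (n:Nat)) / 8 = L := by omega
          rw [h1, ← hg, ← hk, hdivk]
          rw [show P * 2 ^ (8 - k) = P * 2 ^ (8 - k - 1) * 2 by
            rw [mul_assoc, ← pow_succ]; congr 2; omega]
          rw [Int.add_mul_emod_self_right, pv_bitlow g k (by omega)]
        have hdd : X / 2 ^ (k + 1) = X / 2 ^ k / 2 := by
          rw [pow_succ, ← Int.ediv_ediv_of_nonneg (by positivity : (0:Int) ≤ 2 ^ k)]
        have hrec : X / 2 ^ k = 2 * (X / 2 ^ (k + 1)) + pvBit data (off + n) := by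
          rw [hdd, ← hmod2]; omega
        push_cast
        rw [key1, key2, key3, ← hX, hrec, pv_two_mul_emod _ _ n hbb.1 hbb.2]

-- B for a positive bit count, written through pvSpan
theorem pv_alt_pos (data : List Int) (n_bits bit_offset : Int) (h : 0 < n_bits) :
    getUintFromBits_alt data n_bits bit_offset =
      pvSpan data (bit_offset / 8) ((bit_offset + n_bits - 1) / 8 + 1) /
          2 ^ (((bit_offset + n_bits - 1) / 8 + 1) * 8 - (bit_offset + n_bits)).toNat
        % 2 ^ n_bits.toNat := by
  unfold getUintFromBits_alt
  rw [if_neg (by omega)]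
  simp only [PySem.Int.floordiv_eq_ediv_of_pos (show (0:Int) < 8 by norm_num)]
  have hsp : (PySem.List.pyRange (bit_offset / 8) ((bit_offset + n_bits - 1) / 8 + 1) 1).foldl
      (fun span idx => PySem.Int.bor (span <<< (8:Nat)) (PySem.Int.band (PySem.List.pyGetD data idx 0) 255)) 0
      = pvSpan data (bit_offset / 8) ((bit_offset + n_bits - 1) / 8 + 1) := rfl
  rw [hsp, Int.shiftRight_eq_div_pow,
    show ((1 <<< n_bits.toNat : Nat) : Int) - 1 = 2 ^ n_bits.toNat - 1 from by
      rw [Nat.shiftLeft_eq, one_mul]; push_cast; ring]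
  have hnn : 0 ≤ pvSpan data (bit_offset / 8) ((bit_offset + n_bits - 1) / 8 + 1) / ((2 ^ (((bit_offset + n_bits - 1) / 8 + 1) * 8 - (bit_offset + n_bits)).toNat : Nat) : Int) :=
    Int.ediv_nonneg (pv_span_nonneg _ _ _) (by positivity)
  rw [pv_band_mask _ _ hnn]
  push_cast
  rfl

-- ===== VERDICT (by name: the statement is the Claim_ definition above) =====
theorem getUintFromBits_spec : Claim_equal_getUintFromBits := by
  unfold Claim_equal_getUintFromBits Spec_getUintFromBits
  intro data n_bits bit_offset _ _
  by_cases h : n_bits ≤ 0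
  · rw [getUintFromBits_alt, if_pos h]
    unfold getUintFromBits
    rw [PySem.List.pyRange_one_eq_nil h]
    rfl
  · rw [not_le] at h
    have hn : ((n_bits.toNat : Nat) : Int) = n_bits := Int.toNat_of_nonneg (by omega)
    have hm := pv_main data bit_offset n_bits.toNat
    rw [hn] at hm
    rw [hm, pv_alt_pos data n_bits bit_offset h]
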